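-- pv_equiv track=rewrite | github.com/jmcarter17/aoc2020 | day6.py | solve_day6
-- ===== SOURCE A (Python) =====
-- def solve_day6(data):
--     part1 = []
--     part2 = []
--     set1 = set()
--     set2 = set(list('abcdefghijklmnopqrstuvwxyz'))
--     for ln in data:
--         if ln == '':
--             part1.append(set1)
--             part2.append(set2)
--             set1 = set()
--             set2 = set(list('abcdefghijklmnopqrstuvwxyz'))
--         else:
--             setln = set(list(ln))
--             set1 = set1.union(setln)
--             set2 = set2.intersection(setln)
--
--     part1.append(set1)
--     part2.append(set2)
--
--     result1 = sum(len(group) for group in part1)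
--     result2 = sum(len(group) for group in part2)
--
--     return result1, result2
-- ===== SOURCE B (Python) =====
-- def solve_day6(data):
--     # Counting algorithm: per group, tally how many lines contain each character;
--     # part1 = number of distinct characters, part2 = number of letters a-z whose
--     # tally equals the number of lines in the group (26 for an empty group).
--     n = len(data)
--     r1 = 0
--     r2 = 0
--     i = 0
--     while i <= n:
--         counts = {}
--         lines = 0
--         while i < n and data[i] != '':
--             for c in set(data[i]):
--                 counts[c] = counts.get(c, 0) + 1
--             lines += 1
--             i += 1
--         r1 += len(counts)
--         r2 += sum(1 for c in 'abcdefghijklmnopqrstuvwxyz' if counts.get(c, 0) == lines)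
--         i += 1
--     return r1, r2
-- ===== Notes on version B (the rewrite author's own statement) =====
-- stated objective: alternative
-- what changed: B replaces A's per-group set unions and intersections by a counting algorithm: per group it tallies in a dict how many lines contain each character, adding the number of distinct keys to part1 and the number of letters a-z whose tally equals the group's line count to part2.
import Mathlib
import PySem

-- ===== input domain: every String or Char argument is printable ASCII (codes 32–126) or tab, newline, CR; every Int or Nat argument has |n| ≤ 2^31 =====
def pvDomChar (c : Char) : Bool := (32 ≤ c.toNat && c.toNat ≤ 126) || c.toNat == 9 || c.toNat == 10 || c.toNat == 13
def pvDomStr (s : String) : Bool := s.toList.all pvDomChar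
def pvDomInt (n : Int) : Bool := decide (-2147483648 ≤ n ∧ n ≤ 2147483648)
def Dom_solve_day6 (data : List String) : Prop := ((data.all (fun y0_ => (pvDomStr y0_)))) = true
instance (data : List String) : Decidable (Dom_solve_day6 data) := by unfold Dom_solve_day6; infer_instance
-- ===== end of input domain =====

-- B replaces A's per-group set unions/intersections by a counting algorithm: per group it
-- tallies, in a dict, how many lines contain each character; part1 adds the number of
-- distinct keys, part2 adds the number of letters a-z whose tally equals the group's line
-- count. Objective: alternative. Same return value on all inputs; A is total.

-- ===== PORT A =====
def pvAlpha : PySem.Set Char := PySem.Set.ofList "abcdefghijklmnopqrstuvwxyz".toList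

def pvStepA (st : List (PySem.Set Char) × List (PySem.Set Char) × PySem.Set Char × PySem.Set Char)
    (ln : String) :
    List (PySem.Set Char) × List (PySem.Set Char) × PySem.Set Char × PySem.Set Char :=
  if ln == "" then (st.1 ++ [st.2.2.1], st.2.1 ++ [st.2.2.2], PySem.Set.empty, pvAlpha)
  else
    let setln := PySem.Set.ofList ln.toList
    (st.1, st.2.1, PySem.Set.union st.2.2.1 setln, PySem.Set.inter st.2.2.2 setln)

def solve_day6 (data : List String) : Int × Int :=
  let st := data.foldl pvStepA ([], [], PySem.Set.empty, pvAlpha)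
  let part1 := st.1 ++ [st.2.2.1]
  let part2 := st.2.1 ++ [st.2.2.2]
  ((part1.map PySem.Set.len).sum, (part2.map PySem.Set.len).sum)

-- ===== PORT B =====
def pvAlphaList : List Char := "abcdefghijklmnopqrstuvwxyz".toList

-- 'for c in set(data[i]): counts[c] = counts.get(c, 0) + 1'
def pvAddLine (counts : PySem.Dict Char Int) (ln : String) : PySem.Dict Char Int :=
  (PySem.Set.ofList ln.toList).foldl (fun d c => d.insert c (d.getD c 0 + 1)) counts

-- the inner 'while i < n and data[i] != ""' loop: returns (counts, lines, remaining suffix)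
def pvConsume : List String → PySem.Dict Char Int → Int → PySem.Dict Char Int × Int × List String
  | [], counts, lines => (counts, lines, [])
  | ln :: rest, counts, lines =>
    if ln = "" then (counts, lines, ln :: rest)
    else pvConsume rest (pvAddLine counts ln) (lines + 1)

-- termination measure for pvGo (cited in its decreasing_by)
theorem pvConsume_len (data : List String) : ∀ (d : PySem.Dict Char Int) (n : Int),
    (pvConsume data d n).2.2.length ≤ data.length := by
  induction data with
  | nil => intro d n; simp [pvConsume]
  | cons ln rest ih =>
    intro d n
    by_cases h : ln = ""
    · simp [pvConsume, h]
    · simp only [pvConsume, if_neg h, List.length_cons]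
      exact le_trans (ih _ _) (Nat.le_succ _)

-- the outer 'while i <= n' loop (the pointer i is the remaining suffix)
def pvGo (rest : List String) (r1 r2 : Int) : Int × Int :=
  let cp := pvConsume rest PySem.Dict.empty 0
  let r1' := r1 + (cp.1.size : Int)
  let r2' := r2 + pvAlphaList.foldl (fun acc c => if cp.1.getD c 0 = cp.2.1 then acc + 1 else acc) 0
  if h : cp.2.2 = [] then (r1', r2')
  else pvGo cp.2.2.tail r1' r2'
termination_by rest.length
decreasing_by
  have hle := pvConsume_len rest PySem.Dict.empty 0
  cases hcc : (pvConsume rest PySem.Dict.empty 0).2.2 with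
  | nil => exact absurd hcc h
  | cons a t =>
    rw [hcc] at hle
    simp only [List.tail_cons, List.length_cons] at hle ⊢
    omega

def solve_day6_alt (data : List String) : Int × Int := pvGo data 0 0

-- ===== PRECONDITION & SPEC =====
def Spec_solve_day6 (data : List String) (out : Int × Int) : Prop := out = solve_day6_alt data
instance (data : List String) (out : Int × Int) : Decidable (Spec_solve_day6 data out) := by unfold Spec_solve_day6; infer_instance

-- ===== CLAIM (what is proved, stated in full; the proofs are below) =====
def Claim_equal_solve_day6 : Prop := ∀ (data : List String), Dom_solve_day6 data → Spec_solve_day6 data (solve_day6 data)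

-- ===== LEMMAS AND PROOFS =====

-- proof-only vocabulary: the blank-separated groups and each group's union/intersection sets
def pvSplitStep (st : List (List String) × List String) (ln : String) :
    List (List String) × List String :=
  if ln = "" then (st.1 ++ [st.2], []) else (st.1, st.2 ++ [ln])

def pvGroups (data : List String) : List (List String) :=
  let st := data.foldl pvSplitStep ([], [])
  st.1 ++ [st.2]

def pvGroupSets (g : List String) : PySem.Set Char × PySem.Set Char :=
  (g.foldl (fun s ln => PySem.Set.union s (PySem.Set.ofList ln.toList)) PySem.Set.empty,
   g.foldl (fun s ln => PySem.Set.inter s (PySem.Set.ofList ln.toList)) pvAlpha)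

def pvChars (g : List String) : List Char := g.flatMap (fun ln => PySem.Set.ofList ln.toList)

-- ===== A-side: solve_day6 = per-group sums over pvGroups =====

theorem pvLoopInv (data : List String) : ∀ (gs : List (List String)) (cur : List String),
    data.foldl pvStepA (gs.map (fun g => (pvGroupSets g).1), gs.map (fun g => (pvGroupSets g).2),
      (pvGroupSets cur).1, (pvGroupSets cur).2) =
    (let st := data.foldl pvSplitStep (gs, cur)
     (st.1.map (fun g => (pvGroupSets g).1), st.1.map (fun g => (pvGroupSets g).2),
      (pvGroupSets st.2).1, (pvGroupSets st.2).2)) := by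
  induction data with
  | nil => intro gs cur; rfl
  | cons ln rest ih =>
    intro gs cur
    by_cases h : ln = ""
    · subst h
      have h1 : pvStepA (gs.map (fun g => (pvGroupSets g).1), gs.map (fun g => (pvGroupSets g).2),
          (pvGroupSets cur).1, (pvGroupSets cur).2) "" =
          ((gs ++ [cur]).map (fun g => (pvGroupSets g).1),
           (gs ++ [cur]).map (fun g => (pvGroupSets g).2),
           (pvGroupSets ([] : List String)).1, (pvGroupSets ([] : List String)).2) := by
        simp [pvStepA, pvGroupSets]
      simp only [List.foldl_cons, h1, ih, pvSplitStep]
      simp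
    · have h1 : pvStepA (gs.map (fun g => (pvGroupSets g).1), gs.map (fun g => (pvGroupSets g).2),
          (pvGroupSets cur).1, (pvGroupSets cur).2) ln =
          (gs.map (fun g => (pvGroupSets g).1), gs.map (fun g => (pvGroupSets g).2),
           (pvGroupSets (cur ++ [ln])).1, (pvGroupSets (cur ++ [ln])).2) := by
        simp [pvStepA, pvGroupSets, h, List.foldl_append]
      simp only [List.foldl_cons, h1, ih, pvSplitStep]
      simp [h]

theorem solveA_eq_groups (data : List String) :
    solve_day6 data = (((pvGroups data).map (fun g => PySem.Set.len (pvGroupSets g).1)).sum,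
                       ((pvGroups data).map (fun g => PySem.Set.len (pvGroupSets g).2)).sum) := by
  have h := pvLoopInv data [] []
  simp only [List.map_nil] at h
  simp only [solve_day6, pvGroups]
  rw [show ((PySem.Set.empty : PySem.Set Char), pvAlpha) = ((pvGroupSets ([] : List String)).1, (pvGroupSets ([] : List String)).2) from rfl]
  rw [h]
  simp [PySem.Set.len, Function.comp_def]

-- ===== splitting facts about pvGroups / pvConsume =====

theorem dropWhile_head_blank : ∀ (l : List String) (x : String) (t : List String),
    l.dropWhile (fun ln => ln ≠ "") = x :: t → x = "" := by
  intro l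
  induction l with
  | nil => intro x t h; simp at h
  | cons y l ih =>
    intro x t h
    rw [List.dropWhile_cons] at h
    by_cases hy : y = ""
    · simp only [hy, ne_eq, not_true_eq_false, decide_false] at h
      simp only [Bool.false_eq_true, if_false, List.cons.injEq] at h
      exact h.1.symm
    · simp only [ne_eq, hy, not_false_eq_true, decide_true, if_true] at h
      exact ih x t h

theorem foldl_split_nonblank (g : List String) (hg : ∀ ln ∈ g, ln ≠ "") :
    ∀ (gs : List (List String)) (cur : List String),
    g.foldl pvSplitStep (gs, cur) = (gs, cur ++ g) := by
  induction g with
  | nil => intro gs cur; simp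
  | cons ln g ih =>
    intro gs cur
    have hne : ln ≠ "" := hg ln (by simp)
    simp only [List.foldl_cons, pvSplitStep, if_neg hne]
    rw [ih (fun x hx => hg x (by simp [hx]))]
    simp

theorem foldl_split_prefix (t : List String) : ∀ (gs gs0 : List (List String)) (cur : List String),
    t.foldl pvSplitStep (gs ++ gs0, cur) =
      (gs ++ (t.foldl pvSplitStep (gs0, cur)).1, (t.foldl pvSplitStep (gs0, cur)).2) := by
  induction t with
  | nil => intro gs gs0 cur; simp
  | cons ln t ih =>
    intro gs gs0 cur
    by_cases h : ln = ""
    · simp only [List.foldl_cons, pvSplitStep, if_pos h, List.append_assoc]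
      exact ih gs (gs0 ++ [cur]) []
    · simp only [List.foldl_cons, pvSplitStep, if_neg h]
      exact ih gs gs0 (cur ++ [ln])

theorem pvGroups_nonblank (g : List String) (hg : ∀ ln ∈ g, ln ≠ "") : pvGroups g = [g] := by
  simp [pvGroups, foldl_split_nonblank g hg]

theorem pvGroups_cons (g : List String) (hg : ∀ ln ∈ g, ln ≠ "") (t : List String) :
    pvGroups (g ++ "" :: t) = g :: pvGroups t := by
  simp only [pvGroups, List.foldl_append, foldl_split_nonblank g hg, List.foldl_cons,
    List.nil_append]
  have h1 : pvSplitStep ([], g) "" = ([g], []) := by simp [pvSplitStep]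
  rw [h1]
  have hpre := foldl_split_prefix t [g] [] []
  rw [List.append_nil] at hpre
  rw [hpre]
  simp

theorem pvConsume_split (g : List String) : ∀ (rest0 : List String) (d : PySem.Dict Char Int) (n : Int),
    (∀ ln ∈ g, ln ≠ "") → (rest0 = [] ∨ ∃ t, rest0 = "" :: t) →
    pvConsume (g ++ rest0) d n = (g.foldl pvAddLine d, n + g.length, rest0) := by
  induction g with
  | nil =>
    intro rest0 d n _ hr
    rcases hr with rfl | ⟨t, rfl⟩
    · simp [pvConsume]
    · simp [pvConsume]
  | cons ln g ih =>
    intro rest0 d n hg hr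
    have hne : ln ≠ "" := hg ln (by simp)
    simp only [List.cons_append, pvConsume, if_neg hne]
    rw [ih rest0 (pvAddLine d ln) (n + 1) (fun x hx => hg x (by simp [hx])) hr]
    simp only [List.foldl_cons, List.length_cons, Prod.mk.injEq]
    refine ⟨trivial, ?_, trivial⟩
    push_cast
    ring

-- ===== per-group counting facts =====

theorem counts_eq_counter (g : List String) :
    g.foldl pvAddLine PySem.Dict.empty = PySem.Dict.counter (pvChars g) := by
  rw [← PySem.Dict.foldl_insert_getD_add_one_eq_counter, pvChars, List.foldl_flatMap]
  rfl

theorem union_fold (g : List String) : ∀ s : PySem.Set Char,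
    g.foldl (fun s ln => PySem.Set.union s (PySem.Set.ofList ln.toList)) s =
      PySem.Set.update s (pvChars g) := by
  induction g with
  | nil => intro s; simp [pvChars, PySem.Set.update_nil]
  | cons ln g ih =>
    intro s
    simp only [List.foldl_cons]
    rw [ih]
    show (s.update (PySem.Set.ofList ln.toList)).update (pvChars g) = _
    rw [show pvChars (ln :: g) = PySem.Set.ofList ln.toList ++ pvChars g from rfl,
      PySem.Set.update_append]

theorem mem_inter_fold (g : List String) : ∀ (s : PySem.Set Char) (c : Char),
    c ∈ g.foldl (fun s ln => PySem.Set.inter s (PySem.Set.ofList ln.toList)) s ↔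
      c ∈ s ∧ ∀ ln ∈ g, c ∈ PySem.Set.ofList ln.toList := by
  induction g with
  | nil => intro s c; simp
  | cons ln g ih =>
    intro s c
    simp only [List.foldl_cons, ih, PySem.Set.mem_inter, List.mem_cons]
    constructor
    · rintro ⟨⟨hs, hl⟩, hall⟩
      refine ⟨hs, ?_⟩
      intro x hx
      rcases hx with rfl | hx
      · exact hl
      · exact hall x hx
    · rintro ⟨hs, hall⟩
      exact ⟨⟨hs, hall ln (Or.inl rfl)⟩, fun x hx => hall x (Or.inr hx)⟩

theorem nodup_inter_fold (g : List String) : ∀ (s : PySem.Set Char), s.Nodup →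
    (g.foldl (fun s ln => PySem.Set.inter s (PySem.Set.ofList ln.toList)) s).Nodup := by
  induction g with
  | nil => intro s hs; simpa using hs
  | cons ln g ih =>
    intro s hs
    exact ih _ (PySem.Set.nodup_inter _ _ hs)

theorem count_chars (g : List String) (c : Char) :
    (pvChars g).count c = g.countP (fun ln => (PySem.Set.ofList ln.toList).contains c) := by
  induction g with
  | nil => simp [pvChars]
  | cons ln g ih =>
    simp only [pvChars, List.flatMap_cons, List.count_append, List.countP_cons] at *
    by_cases h : c ∈ PySem.Set.ofList ln.toList
    · have hct : (PySem.Set.ofList ln.toList).contains c = true := (PySem.Set.contains_iff _ _).2 h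
      rw [List.count_eq_one_of_mem (PySem.Set.nodup_ofList _) h, ih, if_pos hct]
      omega
    · have hct : ¬ ((PySem.Set.ofList ln.toList).contains c = true) :=
        fun hcc => h ((PySem.Set.contains_iff _ _).1 hcc)
      rw [List.count_eq_zero_of_not_mem h, ih, if_neg hct]
      omega

theorem getD_cond (g : List String) (c : Char) :
    ((g.foldl pvAddLine PySem.Dict.empty).getD c 0 = (g.length : Int)) ↔
      ∀ ln ∈ g, c ∈ PySem.Set.ofList ln.toList := by
  rw [counts_eq_counter, PySem.Dict.getD_counter, Nat.cast_inj, count_chars]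
  constructor
  · intro h ln hln
    have := List.countP_eq_length.1 h ln hln
    exact (PySem.Set.contains_iff _ _).1 this
  · intro h
    exact List.countP_eq_length.2 (fun ln hln => (PySem.Set.contains_iff _ _).2 (h ln hln))

theorem group_size_eq (g : List String) :
    (((g.foldl pvAddLine PySem.Dict.empty).size : Nat) : Int) = PySem.Set.len (pvGroupSets g).1 := by
  rw [counts_eq_counter]
  have hkeys : (PySem.Dict.counter (pvChars g)).keys = PySem.Set.ofList (pvChars g) :=
    PySem.Dict.keys_counter _
  have hsize : (PySem.Dict.counter (pvChars g)).size = (PySem.Dict.counter (pvChars g)).keys.length := by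
    simp [PySem.Dict.size, PySem.Dict.keys]
  rw [hsize, hkeys]
  show _ = PySem.Set.len (g.foldl (fun s ln => PySem.Set.union s (PySem.Set.ofList ln.toList)) PySem.Set.empty)
  rw [union_fold]
  rw [show (PySem.Set.empty : PySem.Set Char) = ([] : List Char) from rfl, PySem.Set.update_nil_left]
  rfl

theorem group_inter_eq (g : List String) :
    pvAlphaList.foldl
        (fun acc c => if (g.foldl pvAddLine PySem.Dict.empty).getD c 0 = (g.length : Int) then acc + 1 else acc) 0
      = PySem.Set.len (pvGroupSets g).2 := by
  rw [PySem.List.foldl_ite_add_one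
      (fun c => (g.foldl pvAddLine PySem.Dict.empty).getD c 0 = (g.length : Int)) pvAlphaList 0]
  have halpha : pvAlpha = pvAlphaList :=
    PySem.Set.ofList_eq_self_of_nodup _ (by decide)
  have hperm :
      (pvAlphaList.filter (fun c => decide ((g.foldl pvAddLine PySem.Dict.empty).getD c 0 = (g.length : Int)))).Perm
        (pvGroupSets g).2 := by
    show List.Perm _ (g.foldl (fun s ln => PySem.Set.inter s (PySem.Set.ofList ln.toList)) pvAlpha)
    rw [List.perm_ext_iff_of_nodup
        (List.Nodup.filter _ (show pvAlphaList.Nodup by decide))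
        (nodup_inter_fold g pvAlpha (by rw [halpha]; decide))]
    intro c
    rw [List.mem_filter, decide_eq_true_eq, getD_cond]
    show _ ↔ c ∈ g.foldl (fun s ln => PySem.Set.inter s (PySem.Set.ofList ln.toList)) pvAlpha
    rw [mem_inter_fold, halpha]
  rw [List.countP_eq_length_filter, hperm.length_eq]
  simp [PySem.Set.len]

-- ===== B-side: pvGo computes the same per-group sums =====

theorem pvGo_spec : ∀ (N : Nat) (rest : List String), rest.length ≤ N → ∀ (r1 r2 : Int),
    pvGo rest r1 r2 =
      (r1 + ((pvGroups rest).map (fun g => PySem.Set.len (pvGroupSets g).1)).sum,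
       r2 + ((pvGroups rest).map (fun g => PySem.Set.len (pvGroupSets g).2)).sum) := by
  intro N
  induction N with
  | zero =>
    intro rest hlen r1 r2
    have : rest = [] := List.eq_nil_of_length_eq_zero (Nat.le_zero.1 hlen)
    subst this
    rw [pvGo]
    have hc : pvConsume [] PySem.Dict.empty 0 = (PySem.Dict.empty, 0, []) := rfl
    simp only [hc]
    have h1 := group_size_eq []
    have h2 := group_inter_eq []
    simp only [List.foldl_nil] at h1 h2
    simp only [List.length_nil, Nat.cast_zero] at h2
    rw [pvGroups_nonblank [] (by simp)]
    simp
    decide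
  | succ N ih =>
    intro rest hlen r1 r2
    -- decompose rest into its first blank-free group and the remainder
    set g := rest.takeWhile (fun ln => ln ≠ "") with hgdef
    set rest0 := rest.dropWhile (fun ln => ln ≠ "") with hrdef
    have hsplit : g ++ rest0 = rest := List.takeWhile_append_dropWhile
    have hgne : ∀ ln ∈ g, ln ≠ "" := by
      intro ln hln
      have := List.mem_takeWhile_imp (hgdef ▸ hln)
      simpa using this
    have hr0 : rest0 = [] ∨ ∃ t, rest0 = "" :: t := by
      cases hc : rest0 with
      | nil => exact Or.inl rfl
      | cons x t =>
        have hx : x = "" := dropWhile_head_blank rest x t (hrdef.symm.trans hc)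
        exact Or.inr ⟨t, by rw [hx]⟩
    have hcons : pvConsume rest PySem.Dict.empty 0 = (g.foldl pvAddLine PySem.Dict.empty, 0 + (g.length : Int), rest0) := by
      rw [← hsplit]; exact pvConsume_split g rest0 PySem.Dict.empty 0 hgne hr0
    rw [pvGo]
    simp only [hcons, zero_add]
    rcases hr0 with h0 | ⟨t, h0⟩
    · rw [← hsplit, h0]
      simp only [List.append_nil, dif_pos]
      rw [pvGroups_nonblank g hgne]
      simp [group_size_eq g, group_inter_eq g]
    · have hne : rest0 ≠ [] := by rw [h0]; simp
      simp only [dif_neg hne]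
      have htlen : t.length ≤ N := by
        have : rest.length = g.length + rest0.length := by rw [← hsplit]; simp
        rw [h0] at this
        simp only [List.length_cons] at this
        omega
      rw [h0]
      simp only [List.tail_cons]
      rw [ih t htlen]
      rw [← hsplit, h0, pvGroups_cons g hgne t]
      simp only [List.map_cons, List.sum_cons, group_size_eq g, group_inter_eq g]
      rw [Prod.mk.injEq]
      exact ⟨by ring, by ring⟩

-- ===== VERDICT (by name: the statement is the Claim_ definition above) =====
theorem solve_day6_spec : Claim_equal_solve_day6 := by
  intro data _
  show _ = _
  rw [solveA_eq_groups, solve_day6_alt, pvGo_spec data.length data le_rfl]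
  simp
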